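-- pv_equiv track=rewrite | github.com/chico127/Enumeration-of-conference-matrices | zdvih.py | bl
-- ===== SOURCE A (Python) =====
-- def bl(c2, nadb6, d2, d_row):
--     bloky = [[0] for i in range(0, c2, 1)]
--     poc = [0 for i in range(0, c2, 1)]
--     pb = 2
--     pos = -1
--     for i, j in enumerate(nadb6[1:-1]):
--         for k in range(0, c2, 1):
--             l = d2[j[0]:nadb6[2 + i][0]].count(k)
--             poc[k] = poc[k] + l
--             if l != 0:
--                 bloky[k].append(poc[k])
--     return bloky
-- ===== SOURCE B (Python) =====
-- def _norm(a, n):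
--     # Python slice-boundary normalization: negative counts from the end, then clamp to [0, n]
--     return max(0, min(n, a + n if a < 0 else a))
--
--
-- def bl(c2, nadb6, d2, d_row):
--     if c2 <= 0:
--         # no values to count: A's result is the empty block list
--         return []
--     # prefix-count table: pref[k][p] = number of occurrences of k in d2[:p]
--     pref = []
--     for k in range(0, c2, 1):
--         row = [0]
--         c = 0
--         for v in d2:
--             if v == k:
--                 c = c + 1
--             row.append(c)
--         pref.append(row)
--     n = len(d2)
--     bloky = [[0] for i in range(0, c2, 1)]
--     poc = [0 for i in range(0, c2, 1)]
--     for i, j in enumerate(nadb6[1:-1]):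
--         s = _norm(j[0], n)
--         e = _norm(nadb6[2 + i][0], n)
--         for k in range(0, c2, 1):
--             l = pref[k][e] - pref[k][s] if s < e else 0
--             poc[k] = poc[k] + l
--             if l != 0:
--                 bloky[k].append(poc[k])
--     return bloky
-- ===== Notes on version B (the rewrite author's own statement) =====
-- stated objective: faster
-- what changed: Replaces the per-segment per-value slice scan d2[a:b].count(k) with a prefix-count table built once over d2, so each segment/value pair costs O(1) via pref[k][e]-pref[k][s] after normalizing slice bounds (with an early [] return when c2 <= 0, where there are no values to count).
import Mathlib
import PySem

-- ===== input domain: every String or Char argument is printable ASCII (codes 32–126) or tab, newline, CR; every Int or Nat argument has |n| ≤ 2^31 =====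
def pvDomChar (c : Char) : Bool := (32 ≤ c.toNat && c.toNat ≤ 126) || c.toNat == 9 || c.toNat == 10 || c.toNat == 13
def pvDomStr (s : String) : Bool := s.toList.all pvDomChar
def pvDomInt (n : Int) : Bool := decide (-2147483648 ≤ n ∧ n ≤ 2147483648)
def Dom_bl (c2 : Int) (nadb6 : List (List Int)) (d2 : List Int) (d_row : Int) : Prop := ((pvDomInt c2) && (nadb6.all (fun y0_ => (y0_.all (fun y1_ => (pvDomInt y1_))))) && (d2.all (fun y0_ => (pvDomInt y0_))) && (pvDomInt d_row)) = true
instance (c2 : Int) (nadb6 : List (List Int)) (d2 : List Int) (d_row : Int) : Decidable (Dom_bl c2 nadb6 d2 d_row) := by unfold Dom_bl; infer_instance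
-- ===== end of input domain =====

-- B replaces the per-segment slice-count scans by a prefix-count table with O(1) range lookups (objective: faster).

-- ===== PORT A =====
def bl (c2 : Int) (nadb6 : List (List Int)) (d2 : List Int) (d_row : Int) : List (List Int) :=
  let bloky0 : List (List Int) := (PySem.List.pyRange 0 c2 1).map (fun _ => ([0] : List Int))
  let poc0 : List Int := (PySem.List.pyRange 0 c2 1).map (fun _ => (0 : Int))
  let res := (PySem.List.enumerate (PySem.List.slice nadb6 (some 1) (some (-1))) 0).foldl
    (fun st ij =>
      (PySem.List.pyRange 0 c2 1).foldl
        (fun st2 k =>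
          let l : Int :=
            (((PySem.List.slice d2
                 (some (PySem.List.pyGetD ij.2 0 0))
                 (some (PySem.List.pyGetD (PySem.List.pyGetD nadb6 (2 + ij.1) []) 0 0))).count k : Nat) : Int)
          let poc' := st2.1.set k.toNat (PySem.List.pyGetD st2.1 k 0 + l)
          let bloky' :=
            if l ≠ 0 then
              st2.2.set k.toNat (PySem.List.pyGetD st2.2 k [] ++ [PySem.List.pyGetD poc' k 0])
            else st2.2
          (poc', bloky')) st)
    (poc0, bloky0)
  res.2

-- ===== PORT B =====
-- Python slice-boundary normalization (Source B's _norm)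
def blNorm (a n : Int) : Int := max 0 (min n (if a < 0 then a + n else a))

-- one prefix-count row: row[p] = count of k in d2[:p]
def blRow (d2 : List Int) (k : Int) : List Int :=
  (d2.foldl (fun cr v =>
      let c := if v == k then cr.1 + 1 else cr.1
      (c, cr.2 ++ [c])) ((0 : Int), ([0] : List Int))).2

def bl_alt (c2 : Int) (nadb6 : List (List Int)) (d2 : List Int) (d_row : Int) : List (List Int) :=
  if c2 ≤ 0 then []
  else
    let pref : List (List Int) := (PySem.List.pyRange 0 c2 1).foldl (fun acc k => acc ++ [blRow d2 k]) []
    let n : Int := d2.length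
    let bloky0 : List (List Int) := (PySem.List.pyRange 0 c2 1).map (fun _ => ([0] : List Int))
    let poc0 : List Int := (PySem.List.pyRange 0 c2 1).map (fun _ => (0 : Int))
    let res := (PySem.List.enumerate (PySem.List.slice nadb6 (some 1) (some (-1))) 0).foldl
      (fun st ij =>
        let s := blNorm (PySem.List.pyGetD ij.2 0 0) n
        let e := blNorm (PySem.List.pyGetD (PySem.List.pyGetD nadb6 (2 + ij.1) []) 0 0) n
        (PySem.List.pyRange 0 c2 1).foldl
          (fun st2 k =>
            let l : Int :=
              if s < e then
                PySem.List.pyGetD (PySem.List.pyGetD pref k []) e 0 -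
                  PySem.List.pyGetD (PySem.List.pyGetD pref k []) s 0
              else 0
            let poc' := st2.1.set k.toNat (PySem.List.pyGetD st2.1 k 0 + l)
            let bloky' :=
              if l ≠ 0 then
                st2.2.set k.toNat (PySem.List.pyGetD st2.2 k [] ++ [PySem.List.pyGetD poc' k 0])
              else st2.2
            (poc', bloky')) st)
      (poc0, bloky0)
    res.2

-- ===== PRECONDITION & SPEC =====
-- Pre_ excludes exactly the inputs where A raises: with c2 > 0 and len(nadb6) >= 3, the segment
-- loop evaluates j[0] / nadb6[2+i][0] on every element of nadb6[1:], so an empty inner list there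
-- is an IndexError (B raises there too).
def Pre_bl (c2 : Int) (nadb6 : List (List Int)) (d2 : List Int) (d_row : Int) : Prop :=
  (0 < c2 ∧ 3 ≤ nadb6.length) → ∀ x ∈ nadb6.drop 1, x ≠ []
instance (c2 : Int) (nadb6 : List (List Int)) (d2 : List Int) (d_row : Int) : Decidable (Pre_bl c2 nadb6 d2 d_row) := by unfold Pre_bl; infer_instance

def pvWitness_bl : Int × List (List Int) × List Int × Int := (2, [[0], [0], [1]], [0, 1, 0], 0)

def Spec_bl (c2 : Int) (nadb6 : List (List Int)) (d2 : List Int) (d_row : Int) (out : List (List Int)) : Prop := out = bl_alt c2 nadb6 d2 d_row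
instance (c2 : Int) (nadb6 : List (List Int)) (d2 : List Int) (d_row : Int) (out : List (List Int)) : Decidable (Spec_bl c2 nadb6 d2 d_row out) := by unfold Spec_bl; infer_instance

-- ===== CLAIM (what is proved, stated in full; the proofs are below) =====
def Claim_equal_bl : Prop := ∀ (c2 : Int) (nadb6 : List (List Int)) (d2 : List Int) (d_row : Int), Dom_bl c2 nadb6 d2 d_row → Pre_bl c2 nadb6 d2 d_row → Spec_bl c2 nadb6 d2 d_row (bl c2 nadb6 d2 d_row)

-- ===== LEMMAS AND PROOFS =====

-- the row fold's invariant
lemma blRow_aux (k : Int) (xs : List Int) : ∀ (c : Int) (row : List Int),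
    (xs.foldl (fun cr v =>
      let c := if v == k then cr.1 + 1 else cr.1
      (c, cr.2 ++ [c])) (c, row)).2
      = row ++ (List.range xs.length).map (fun p => c + ((xs.take (p + 1)).count k : Int)) := by
  induction xs with
  | nil => simp
  | cons x xs ih =>
    intro c row
    simp only [List.foldl_cons, ih, List.length_cons, List.range_succ_eq_map, List.map_cons,
      List.map_map]
    simp only [List.take_succ_cons, List.count_cons, List.append_assoc, List.cons_append,
      List.nil_append, List.append_cancel_left_eq]
    by_cases h : x = k
    · simp [h, Function.comp_def, add_comm, add_assoc]
    · have : (x == k) = false := by simp [h]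
      simp [this, Function.comp_def]

lemma blRow_eq (d2 : List Int) (k : Int) :
    blRow d2 k = (List.range (d2.length + 1)).map (fun p => ((d2.take p).count k : Int)) := by
  rw [blRow, blRow_aux]
  rw [List.range_succ_eq_map, List.map_cons, List.map_map]
  simp [Function.comp_def]

lemma blRow_get (d2 : List Int) (k : Int) (p : Nat) (hp : p ≤ d2.length) :
    PySem.List.pyGetD (blRow d2 k) (p : Int) 0 = ((d2.take p).count k : Int) := by
  rw [blRow_eq, PySem.List.pyGetD_natCast,
    PySem.List.getD_map_range _ _ _ _ (by omega)]

lemma blNorm_eq_clampIdx (a : Int) (n : Nat) :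
    blNorm a (n : Int) = ((PySem.List.clampIdx n a : Nat) : Int) := by
  simp only [blNorm, PySem.List.clampIdx]
  split_ifs with h1 h2 <;> omega

-- count of a slice equals a prefix-count difference
lemma slice_count (d2 : List Int) (a b k : Int) :
    (((PySem.List.slice d2 (some a) (some b)).count k : Nat) : Int)
      = if blNorm a d2.length < blNorm b d2.length then
          ((d2.take (PySem.List.clampIdx d2.length b)).count k : Int)
            - ((d2.take (PySem.List.clampIdx d2.length a)).count k : Int)
        else 0 := by
  rw [blNorm_eq_clampIdx, blNorm_eq_clampIdx]
  simp only [PySem.List.slice]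
  set s := PySem.List.clampIdx d2.length a with hs
  set e := PySem.List.clampIdx d2.length b with he
  by_cases h : s < e
  · simp only [Nat.cast_lt.mpr h]
    have hcov : d2.take e = d2.take s ++ (d2.drop s).take (e - s) := by
      conv_lhs => rw [show e = s + (e - s) by omega]
      exact List.take_add ..
    rw [hcov, List.count_append]
    push_cast
    ring
  · have he' : e - s = 0 := by omega
    rw [he', if_neg (by exact_mod_cast h)]
    simp

lemma pref_get (c2 : Int) (d2 : List Int) (k : Int) (hk0 : 0 ≤ k) (hk : k < c2) :
    PySem.List.pyGetD ((PySem.List.pyRange 0 c2 1).foldl (fun acc k => acc ++ [blRow d2 k]) []) k []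
      = blRow d2 k := by
  rw [PySem.List.foldl_append_singleton_eq_map, List.nil_append,
    PySem.List.pyGetD_map_pyRange_of_nonneg _ _ _ _ hk0 hk]

lemma foldl_id {α β : Type} (l : List β) (st : α) : l.foldl (fun st _ => st) st = st := by
  induction l generalizing st with
  | nil => rfl
  | cons x xs ih => simpa using ih st

-- ===== VERDICT (by name: the statement is the Claim_ definition above) =====
theorem bl_spec : Claim_equal_bl := by
  intro c2 nadb6 d2 d_row _ _
  unfold Spec_bl bl bl_alt
  by_cases hc : c2 ≤ 0
  · rw [if_pos hc]
    have hr : PySem.List.pyRange 0 c2 1 = [] := by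
      simp [PySem.List.pyRange]; omega
    simp only [hr, List.map_nil, List.foldl_nil, foldl_id]
  · rw [if_neg hc]
    refine congrArg Prod.snd ?_
    refine PySem.List.foldl_congr_mem _ _ _ _ ?_
    intro st ij _
    refine PySem.List.foldl_congr_mem _ _ _ _ ?_
    intro st2 k hk
    obtain ⟨hk0, hkc⟩ := PySem.List.mem_pyRange_one.mp hk
    have hl :
        (((PySem.List.slice d2 (some (PySem.List.pyGetD ij.2 0 0))
             (some (PySem.List.pyGetD (PySem.List.pyGetD nadb6 (2 + ij.1) []) 0 0))).count k : Nat) : Int)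
          = if blNorm (PySem.List.pyGetD ij.2 0 0) (d2.length : Int)
                < blNorm (PySem.List.pyGetD (PySem.List.pyGetD nadb6 (2 + ij.1) []) 0 0) (d2.length : Int) then
              PySem.List.pyGetD (PySem.List.pyGetD ((PySem.List.pyRange 0 c2 1).foldl (fun acc k => acc ++ [blRow d2 k]) []) k [])
                (blNorm (PySem.List.pyGetD (PySem.List.pyGetD nadb6 (2 + ij.1) []) 0 0) (d2.length : Int)) 0
                - PySem.List.pyGetD (PySem.List.pyGetD ((PySem.List.pyRange 0 c2 1).foldl (fun acc k => acc ++ [blRow d2 k]) []) k [])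
                (blNorm (PySem.List.pyGetD ij.2 0 0) (d2.length : Int)) 0
            else 0 := by
      rw [slice_count, pref_get c2 d2 k hk0 hkc]
      by_cases h : blNorm (PySem.List.pyGetD ij.2 0 0) (d2.length : Int)
          < blNorm (PySem.List.pyGetD (PySem.List.pyGetD nadb6 (2 + ij.1) []) 0 0) (d2.length : Int)
      · rw [if_pos h, if_pos h, blNorm_eq_clampIdx, blNorm_eq_clampIdx,
          blRow_get _ _ _ (PySem.List.clampIdx_le _ _), blRow_get _ _ _ (PySem.List.clampIdx_le _ _)]
      · rw [if_neg h, if_neg h]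
    show _ = _
    rw [hl]
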